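-- pv_equiv track=rewrite | github.com/hamilcar1026/polish-learning-app | main.py | get_conjugation_category_key
-- ===== SOURCE A (Python) =====
-- def get_conjugation_category_key(base_tag, full_tag):
--     aspect = None
--     tense_aspect = None
--     mood = None # Not reliably extracted from standard tags
--
--     parts = full_tag.split(':')
--     # Basic positional guessing (can be refined)
--     if len(parts) > 1: number = parts[1]
--     if len(parts) > 2: case_person_gender = parts[2]
--     if len(parts) > 3: gender_aspect_etc = parts[3]
--
--     # Try to find aspect more reliably
--     for part in parts:
--         if part == 'perf': aspect = 'perf'; break
--         if part == 'imperf': aspect = 'imperf'; break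
--
--     # Assign tense_aspect based on base tag and aspect
--     if base_tag == 'fin' and aspect: tense_aspect = aspect
--     if base_tag == 'praet' and aspect: tense_aspect = aspect # Past uses aspect
--     # Add more specific tense_aspect logic if needed
--
--     # Mimic frontend logic
--     if base_tag == 'fin':
--         if tense_aspect == 'imperf': return 'conjugationCategoryPresentIndicative'
--         if tense_aspect == 'perf': return 'conjugationCategoryFuturePerfectiveIndicative'
--         return 'conjugationCategoryFiniteVerb' # Fallback
--     elif base_tag == 'bedzie': return 'conjugationCategoryFutureImperfectiveIndicative'
--     elif base_tag == 'praet': return 'conjugationCategoryPastTense'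
--     elif base_tag == 'impt': return 'conjugationCategoryImperative'
--     elif base_tag == 'impt_periph': return 'conjugationCategoryImperative' # Group with impt
--     elif base_tag == 'inf': return 'conjugationCategoryInfinitive'
--     elif base_tag == 'pcon': return 'conjugationCategoryPresentAdverbialParticiple'
--     elif base_tag == 'pant': return 'conjugationCategoryAnteriorAdverbialParticiple'
--     elif base_tag == 'pact': return 'conjugationCategoryPresentActiveParticiple'
--     elif base_tag == 'ppas': return 'conjugationCategoryPastPassiveParticiple'
--     elif base_tag == 'ger': return 'conjugationCategoryVerbalNoun'
--     elif base_tag == 'imps':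
--         # 향상된 비인칭 구분 로직
--         if full_tag.startswith('imps:pef') or any(part == 'perf' for part in parts):
--             return 'conjugationCategoryPastImpersonal'
--         else:
--             return 'conjugationCategoryPresentImpersonal'
--     elif base_tag == 'cond': return 'conjugationCategoryConditional'
--     # 추가된 비인칭 태그 처리
--     elif base_tag == 'fut_imps': return 'conjugationCategoryFutureImpersonal'
--     elif base_tag == 'cond_imps': return 'conjugationCategoryConditionalImpersonal'
--     elif base_tag == 'impt_imps': return 'conjugationCategoryImperativeImpersonal'
--     else: return 'conjugationCategoryOtherForms' # Group others
-- ===== SOURCE B (Python) =====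
-- # B: two-stage pipeline -- first NORMALIZE (base_tag, full_tag) into a composite
-- # (tag, subkey) pair (folding the full_tag-dependent 'fin'/'imps' distinctions into
-- # the subkey), then resolve every case uniformly by a linear scan of one rule list.
--
-- _RULES = [
--     (('fin', 'imperf'), 'conjugationCategoryPresentIndicative'),
--     (('fin', 'perf'), 'conjugationCategoryFuturePerfectiveIndicative'),
--     (('fin', ''), 'conjugationCategoryFiniteVerb'),
--     (('imps', 'past'), 'conjugationCategoryPastImpersonal'),
--     (('imps', 'pres'), 'conjugationCategoryPresentImpersonal'),
--     (('bedzie', ''), 'conjugationCategoryFutureImperfectiveIndicative'),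
--     (('praet', ''), 'conjugationCategoryPastTense'),
--     (('impt', ''), 'conjugationCategoryImperative'),
--     (('impt_periph', ''), 'conjugationCategoryImperative'),
--     (('inf', ''), 'conjugationCategoryInfinitive'),
--     (('pcon', ''), 'conjugationCategoryPresentAdverbialParticiple'),
--     (('pant', ''), 'conjugationCategoryAnteriorAdverbialParticiple'),
--     (('pact', ''), 'conjugationCategoryPresentActiveParticiple'),
--     (('ppas', ''), 'conjugationCategoryPastPassiveParticiple'),
--     (('ger', ''), 'conjugationCategoryVerbalNoun'),
--     (('cond', ''), 'conjugationCategoryConditional'),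
--     (('fut_imps', ''), 'conjugationCategoryFutureImpersonal'),
--     (('cond_imps', ''), 'conjugationCategoryConditionalImpersonal'),
--     (('impt_imps', ''), 'conjugationCategoryImperativeImpersonal'),
-- ]
--
--
-- def _normalize(base_tag, full_tag):
--     parts = full_tag.split(':')
--     if base_tag == 'fin':
--         aspect = next((p for p in parts if p in ('perf', 'imperf')), '')
--         return ('fin', aspect)
--     if base_tag == 'imps':
--         past = full_tag.startswith('imps:pef') or 'perf' in parts
--         return ('imps', 'past' if past else 'pres')
--     return (base_tag, '')
--
--
-- def get_conjugation_category_key(base_tag, full_tag):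
--     key = _normalize(base_tag, full_tag)
--     for rule_key, category in _RULES:
--         if rule_key == key:
--             return category
--     return 'conjugationCategoryOtherForms'
-- ===== Notes on version B (the rewrite author's own statement) =====
-- stated objective: alternative
-- what changed: Replaces A's interleaved if/elif chain with inline aspect bookkeeping by a two-stage pipeline: a normalization step folds the full_tag-dependent fin/imps distinctions into a composite (tag, subkey) pair, which is then resolved uniformly by a linear first-match scan of one declarative rule list.
import Mathlib
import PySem

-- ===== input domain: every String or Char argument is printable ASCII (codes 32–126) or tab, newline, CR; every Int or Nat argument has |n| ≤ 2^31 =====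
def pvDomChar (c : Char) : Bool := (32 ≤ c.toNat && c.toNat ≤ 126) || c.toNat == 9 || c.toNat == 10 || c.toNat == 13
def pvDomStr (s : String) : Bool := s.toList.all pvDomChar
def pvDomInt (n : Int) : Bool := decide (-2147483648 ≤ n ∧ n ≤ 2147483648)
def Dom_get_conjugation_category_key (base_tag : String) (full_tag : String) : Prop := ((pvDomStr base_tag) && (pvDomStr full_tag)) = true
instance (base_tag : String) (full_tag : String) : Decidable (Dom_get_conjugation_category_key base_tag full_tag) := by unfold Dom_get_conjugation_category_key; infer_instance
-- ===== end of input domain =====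

-- B restructures A's interleaved if/elif chain as a normalize-then-rule-scan pipeline (alternative decomposition; same cost).

-- ===== PORT A =====
-- the aspect-finding loop of A: first part equal to 'perf' or 'imperf'
def pvAspectLoop : List String → Option String
  | [] => none
  | p :: rest =>
      if p = "perf" then some "perf"
      else if p = "imperf" then some "imperf"
      else pvAspectLoop rest

def get_conjugation_category_key (base_tag : String) (full_tag : String) : String :=
  let parts := (PySem.Str.split? full_tag ":").getD []
  let aspect := pvAspectLoop parts
  let tense_aspect : Option String := none
  let tense_aspect := if base_tag = "fin" && aspect.isSome then aspect else tense_aspect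
  let tense_aspect := if base_tag = "praet" && aspect.isSome then aspect else tense_aspect
  if base_tag = "fin" then
    if tense_aspect = some "imperf" then "conjugationCategoryPresentIndicative"
    else if tense_aspect = some "perf" then "conjugationCategoryFuturePerfectiveIndicative"
    else "conjugationCategoryFiniteVerb"
  else if base_tag = "bedzie" then "conjugationCategoryFutureImperfectiveIndicative"
  else if base_tag = "praet" then "conjugationCategoryPastTense"
  else if base_tag = "impt" then "conjugationCategoryImperative"
  else if base_tag = "impt_periph" then "conjugationCategoryImperative"
  else if base_tag = "inf" then "conjugationCategoryInfinitive"
  else if base_tag = "pcon" then "conjugationCategoryPresentAdverbialParticiple"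
  else if base_tag = "pant" then "conjugationCategoryAnteriorAdverbialParticiple"
  else if base_tag = "pact" then "conjugationCategoryPresentActiveParticiple"
  else if base_tag = "ppas" then "conjugationCategoryPastPassiveParticiple"
  else if base_tag = "ger" then "conjugationCategoryVerbalNoun"
  else if base_tag = "imps" then
    if PySem.Str.startswith full_tag "imps:pef" || parts.any (fun p => p == "perf") then
      "conjugationCategoryPastImpersonal"
    else "conjugationCategoryPresentImpersonal"
  else if base_tag = "cond" then "conjugationCategoryConditional"
  else if base_tag = "fut_imps" then "conjugationCategoryFutureImpersonal"
  else if base_tag = "cond_imps" then "conjugationCategoryConditionalImpersonal"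
  else if base_tag = "impt_imps" then "conjugationCategoryImperativeImpersonal"
  else "conjugationCategoryOtherForms"

-- ===== PORT B =====
def pvRules : List ((String × String) × String) :=
  [ (("fin", "imperf"), "conjugationCategoryPresentIndicative"),
    (("fin", "perf"), "conjugationCategoryFuturePerfectiveIndicative"),
    (("fin", ""), "conjugationCategoryFiniteVerb"),
    (("imps", "past"), "conjugationCategoryPastImpersonal"),
    (("imps", "pres"), "conjugationCategoryPresentImpersonal"),
    (("bedzie", ""), "conjugationCategoryFutureImperfectiveIndicative"),
    (("praet", ""), "conjugationCategoryPastTense"),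
    (("impt", ""), "conjugationCategoryImperative"),
    (("impt_periph", ""), "conjugationCategoryImperative"),
    (("inf", ""), "conjugationCategoryInfinitive"),
    (("pcon", ""), "conjugationCategoryPresentAdverbialParticiple"),
    (("pant", ""), "conjugationCategoryAnteriorAdverbialParticiple"),
    (("pact", ""), "conjugationCategoryPresentActiveParticiple"),
    (("ppas", ""), "conjugationCategoryPastPassiveParticiple"),
    (("ger", ""), "conjugationCategoryVerbalNoun"),
    (("cond", ""), "conjugationCategoryConditional"),
    (("fut_imps", ""), "conjugationCategoryFutureImpersonal"),
    (("cond_imps", ""), "conjugationCategoryConditionalImpersonal"),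
    (("impt_imps", ""), "conjugationCategoryImperativeImpersonal") ]

-- B's normalization stage: fold the full_tag-dependent distinctions into a composite key
def pvNormalize (base_tag : String) (full_tag : String) : String × String :=
  let parts := (PySem.Str.split? full_tag ":").getD []
  if base_tag = "fin" then
    ("fin", ((parts.find? (fun p => p == "perf" || p == "imperf")).getD ""))
  else if base_tag = "imps" then
    ("imps", if PySem.Str.startswith full_tag "imps:pef" || parts.contains "perf" then "past" else "pres")
  else (base_tag, "")

-- B's rule-scan loop: first rule whose key matches, else the default
def pvScanRules : List ((String × String) × String) → String × String → String
  | [], _ => "conjugationCategoryOtherForms"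
  | (rk, cat) :: rest, key => if rk = key then cat else pvScanRules rest key

def get_conjugation_category_key_alt (base_tag : String) (full_tag : String) : String :=
  pvScanRules pvRules (pvNormalize base_tag full_tag)

-- ===== PRECONDITION & SPEC =====
def Spec_get_conjugation_category_key (base_tag : String) (full_tag : String) (out : String) : Prop := out = get_conjugation_category_key_alt base_tag full_tag
instance (base_tag : String) (full_tag : String) (out : String) : Decidable (Spec_get_conjugation_category_key base_tag full_tag out) := by unfold Spec_get_conjugation_category_key; infer_instance

-- ===== CLAIM (what is proved, stated in full; the proofs are below) =====
def Claim_equal_get_conjugation_category_key : Prop := ∀ (base_tag : String) (full_tag : String), Dom_get_conjugation_category_key base_tag full_tag → Spec_get_conjugation_category_key base_tag full_tag (get_conjugation_category_key base_tag full_tag)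

-- ===== LEMMAS AND PROOFS =====
theorem pvAspectLoop_eq_find (l : List String) :
    pvAspectLoop l = l.find? (fun p => p == "perf" || p == "imperf") := by
  induction l with
  | nil => rfl
  | cons p rest ih =>
      by_cases h1 : p = "perf"
      · subst h1; simp [pvAspectLoop]
      · by_cases h2 : p = "imperf"
        · subst h2; simp [pvAspectLoop]
        · rw [List.find?_cons_of_neg (by simp [h1, h2])]
          simp [pvAspectLoop, h1, h2, ih]

theorem pvAnyContains (l : List String) :
    (l.any (fun p => p == "perf")) = l.contains "perf" := by
  induction l with
  | nil => rfl
  | cons p rest ih =>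
      simp only [List.any_cons, List.contains_cons, ih]
      rcases eq_or_ne p "perf" with h | h
      · subst h; rfl
      · rw [show (p == "perf") = false from by simpa using h,
            show (("perf" : String) == p) = false from by simpa using Ne.symm h]

theorem pvScanRules_default (bt : String) (hfin : bt ≠ "fin")
    (h1 : bt ≠ "bedzie") (h2 : bt ≠ "praet") (h3 : bt ≠ "impt") (h4 : bt ≠ "impt_periph")
    (h5 : bt ≠ "inf") (h6 : bt ≠ "pcon") (h7 : bt ≠ "pant") (h8 : bt ≠ "pact")
    (h9 : bt ≠ "ppas") (h10 : bt ≠ "ger") (h11 : bt ≠ "cond") (h12 : bt ≠ "fut_imps")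
    (h13 : bt ≠ "cond_imps") (h14 : bt ≠ "impt_imps") :
    pvScanRules pvRules (bt, "") = "conjugationCategoryOtherForms" := by
  simp [pvRules, pvScanRules, Prod.ext_iff, Ne.symm hfin, Ne.symm h1, Ne.symm h2, Ne.symm h3, Ne.symm h4,
    Ne.symm h5, Ne.symm h6, Ne.symm h7, Ne.symm h8, Ne.symm h9, Ne.symm h10, Ne.symm h11,
    Ne.symm h12, Ne.symm h13, Ne.symm h14]

-- ===== VERDICT (by name: the statement is the Claim_ definition above) =====
theorem get_conjugation_category_key_spec : Claim_equal_get_conjugation_category_key := by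
  intro bt ft _
  unfold Spec_get_conjugation_category_key
  unfold get_conjugation_category_key get_conjugation_category_key_alt pvNormalize
  simp only [pvAspectLoop_eq_find]
  by_cases hfin : bt = "fin"
  · subst hfin
    cases hfd : ((PySem.Str.split? ft ":").getD []).find? (fun p => p == "perf" || p == "imperf") with
    | none => simp [pvScanRules, pvRules]
    | some a =>
        have ha := List.find?_some hfd
        simp only [Bool.or_eq_true, beq_iff_eq] at ha
        rcases ha with ha | ha <;> subst ha <;> simp [pvScanRules, pvRules]
  · by_cases himp : bt = "imps"
    · subst himp
      simp only [pvAnyContains]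
      simp [hfin, pvScanRules, pvRules]
      split_ifs <;> simp_all
    · by_cases h1 : bt = "bedzie"
      · subst h1; simp [pvScanRules, pvRules]
      · by_cases h2 : bt = "praet"
        · subst h2; simp [pvScanRules, pvRules]
        · by_cases h3 : bt = "impt"
          · subst h3; simp [pvScanRules, pvRules]
          · by_cases h4 : bt = "impt_periph"
            · subst h4; simp [pvScanRules, pvRules]
            · by_cases h5 : bt = "inf"
              · subst h5; simp [pvScanRules, pvRules]
              · by_cases h6 : bt = "pcon"
                · subst h6; simp [pvScanRules, pvRules]
                · by_cases h7 : bt = "pant"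
                  · subst h7; simp [pvScanRules, pvRules]
                  · by_cases h8 : bt = "pact"
                    · subst h8; simp [pvScanRules, pvRules]
                    · by_cases h9 : bt = "ppas"
                      · subst h9; simp [pvScanRules, pvRules]
                      · by_cases h10 : bt = "ger"
                        · subst h10; simp [pvScanRules, pvRules]
                        · by_cases h11 : bt = "cond"
                          · subst h11; simp [pvScanRules, pvRules]
                          · by_cases h12 : bt = "fut_imps"
                            · subst h12; simp [pvScanRules, pvRules]
                            · by_cases h13 : bt = "cond_imps"
                              · subst h13; simp [pvScanRules, pvRules]
                              · by_cases h14 : bt = "impt_imps"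
                                · subst h14; simp [pvScanRules, pvRules]
                                · simp [hfin, himp, h1, h2, h3, h4, h5, h6, h7, h8, h9, h10,
                                        h11, h12, h13, h14,
                                        pvScanRules_default bt hfin h1 h2 h3 h4 h5 h6 h7 h8
                                          h9 h10 h11 h12 h13 h14]
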